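-- pv_equiv track=rewrite | github.com/Rakeshdhanekula-colab/Fibonacci | Fibonacci copy.py | get
-- ===== SOURCE A (Python) =====
-- def fibo(n):
--     fibonacci = []
--     n1, n2 = 1, 1
--     count = 0
--     while count<=n:
--         n12 = n1+n2
--         fibonacci.append(n12)
--         n1 = n2
--         n2 = n12
--         count = n12
--     return fibonacci
--
-- def get(n):
--     comb = []
--     n = n
--     step_sizes = fibo(n)
--
--     if n < min(step_sizes):
--         return comb
--
--     for step_size in step_sizes:
--         if n == step_size:
--             comb.append([step_size])
--         elif n > step_size:
--             child_combos = get(n - step_size)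
--
--             for child_combo in child_combos:
--                 comb.append([step_size] + child_combo)
--
--
--     for i in range(len(comb)):
--         comb[i].sort()
--
--     res = [list(tupl) for tupl in {tuple(item) for item in comb}]
--
--     return res
-- ===== SOURCE B (Python) =====
-- def get(n):
--     # Bottom-up DP: table[m] = the unique sorted Fibonacci combinations summing to m.
--     # Each subproblem is solved once (A recomputes get(m) exponentially many times).
--     table = {}
--     for m in range(2, n + 1):
--         comb = []
--         f1, f2 = 1, 1
--         while f1 + f2 <= m:
--             f = f1 + f2
--             f1, f2 = f2, f
--             if f == m:
--                 comb.append([f])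
--             else:
--                 comb.extend(sorted([f] + c) for c in table.get(m - f, []))
--         table[m] = [list(t) for t in dict.fromkeys(map(tuple, comb))]
--     return table.get(n, [])
-- ===== Notes on version B (the rewrite author's own statement) =====
-- stated objective: faster
-- what changed: Replaced A's exponential top-down recursion (the same subproblem recomputed at every call site) by a bottom-up dynamic-programming table filled once per subproblem, deduplicating each level in first-occurrence order with dict.fromkeys instead of a set (the same finite set of combinations); intended as faster, measured 16.6x at the largest size both finished (the output itself grows exponentially with n, so both time out on very large n).
import Mathlib
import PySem

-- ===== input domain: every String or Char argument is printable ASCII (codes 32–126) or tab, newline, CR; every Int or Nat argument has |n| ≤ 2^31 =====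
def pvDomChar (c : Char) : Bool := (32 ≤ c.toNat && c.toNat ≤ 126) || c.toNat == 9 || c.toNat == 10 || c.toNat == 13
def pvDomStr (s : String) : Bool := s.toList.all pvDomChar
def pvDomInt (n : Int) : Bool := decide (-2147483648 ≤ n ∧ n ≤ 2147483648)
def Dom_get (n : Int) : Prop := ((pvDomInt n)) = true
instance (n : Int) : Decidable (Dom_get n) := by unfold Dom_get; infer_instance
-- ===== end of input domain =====

-- B replaces A's exponential top-down recursion by a bottom-up DP table, each subproblem solved
-- once (intended as faster; measured 16.6x at the largest size both Pythons finished). Each level's result is a SET in Python (A: a set comprehension, B: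
-- dict.fromkeys), ported by the PySem set convention (distinct elements, first-occurrence order);
-- outputs are compared as finite sets. Equivalence is about the return value.

-- ===== PORT A =====
def fiboLoop : Nat → Int → Int → Int → Int → List Int → List Int
  | 0, _, _, _, _, fib => fib
  | fuel+1, n, n1, n2, count, fib =>
    if count ≤ n then
      fiboLoop fuel n n2 (n1+n2) (n1+n2) (fib ++ [n1+n2])
    else fib

-- fuel n.toNat+2 is enough: count strictly increases each iteration, so the while loop ends first
def fibo (n : Int) : List Int := fiboLoop (n.toNat + 2) n 1 1 0 []

-- A's recursion, on fuel n.toNat (each recursive call subtracts a step ≥ 2)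
def getAux : Nat → Int → List (List Int)
  | 0, _ => []
  | fuel+1, n =>
    let stepSizes := fibo n
    match PySem.List.min? stepSizes (fun x => x) with
    | none => []   -- Python: min([]) raises ValueError here (negative n); excluded by Pre_get
    | some mn =>
      if n < mn then []
      else
        let comb := stepSizes.foldl (fun acc s =>
          if n = s then acc ++ [[s]]
          else if n > s then acc ++ ((getAux fuel (n - s)).map (fun c => s :: c))
          else acc) ([] : List (List Int))
        -- comb[i].sort(); then {tuple(item) for item in comb}, a set: PySem.Set
        PySem.Set.ofList (comb.map (fun c => PySem.List.sorted c (fun x => x) false))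

def get (n : Int) : List (List Int) := getAux n.toNat n

-- ===== PORT B =====
-- Source B's inner while loop generating Fibonacci steps f = f1+f2 while f ≤ m
-- (fuel m.toNat+2 is enough: f2 strictly increases each iteration)
def combLoop : Nat → PySem.Dict Int (List (List Int)) → Int → Int → Int → List (List Int) → List (List Int)
  | 0, _, _, _, _, comb => comb
  | fuel+1, tbl, m, f1, f2, comb =>
    if f1 + f2 ≤ m then
      let f := f1 + f2
      let comb' := if f = m then comb ++ [[f]]
        else comb ++ (tbl.getD (m - f) []).map (fun c => PySem.List.sorted (f :: c) (fun x => x) false)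
      combLoop fuel tbl m f2 f comb'
    else comb

def get_alt (n : Int) : List (List Int) :=
  ((PySem.List.pyRange 2 (n+1) 1).foldl
    (fun tbl m => tbl.insert m (PySem.List.dedup (combLoop (m.toNat + 2) tbl m 1 1 [])))
    PySem.Dict.empty).getD n []

-- ===== PRECONDITION & SPEC =====
-- Pre_ excludes exactly the negative inputs, where A raises ValueError (min() of the empty Fibonacci list)
def Pre_get (n : Int) : Prop := 0 ≤ n
instance (n : Int) : Decidable (Pre_get n) := by unfold Pre_get; infer_instance
def pvWitness_get : Int := 8

def Spec_get (n : Int) (out : List (List Int)) : Prop := out = get_alt n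
instance (n : Int) (out : List (List Int)) : Decidable (Spec_get n out) := by unfold Spec_get; infer_instance

-- ===== CLAIM (what is proved, stated in full; the proofs are below) =====
def Claim_equal_get : Prop := ∀ (n : Int), Dom_get n → Pre_get n → Spec_get n (get n)

-- ===== LEMMAS AND PROOFS =====

theorem fiboLoop_acc (fuel : Nat) : ∀ (n n1 n2 c : Int) (acc : List Int),
    fiboLoop fuel n n1 n2 c acc = acc ++ fiboLoop fuel n n1 n2 c [] := by
  induction fuel with
  | zero => intro n n1 n2 c acc; simp [fiboLoop]
  | succ f ih =>
    intro n n1 n2 c acc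
    simp only [fiboLoop]
    split
    · rw [ih n n2 (n1+n2) (n1+n2) (acc ++ [n1+n2]), ih n n2 (n1+n2) (n1+n2) ([] ++ [n1+n2])]
      simp
    · simp

theorem fiboLoop_ge_two (fuel : Nat) : ∀ (n n1 n2 c : Int), 1 ≤ n1 → 1 ≤ n2 →
    ∀ x ∈ fiboLoop fuel n n1 n2 c [], 2 ≤ x := by
  induction fuel with
  | zero => intro n n1 n2 c _ _ x hx; simp [fiboLoop] at hx
  | succ f ih =>
    intro n n1 n2 c h1 h2 x hx
    simp only [fiboLoop] at hx
    split at hx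
    · rw [fiboLoop_acc] at hx
      rcases List.mem_append.1 hx with h | h
      · simp at h; omega
      · exact ih n n2 (n1+n2) (n1+n2) h2 (by omega) x h
    · simp at hx

theorem fibo_ge_two (n : Int) : ∀ x ∈ fibo n, 2 ≤ x :=
  fiboLoop_ge_two _ n 1 1 0 (by norm_num) (by norm_num)

theorem fibo_cons (n : Int) (hn : 0 ≤ n) :
    fibo n = 2 :: fiboLoop (n.toNat + 1) n 1 2 2 [] := by
  show fiboLoop (n.toNat + 1 + 1) n 1 1 0 [] = _
  conv_lhs => rw [fiboLoop]
  rw [if_pos hn]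
  norm_num
  rw [fiboLoop_acc]
  rfl

theorem min?_fibo (n : Int) (hn : 0 ≤ n) :
    PySem.List.min? (fibo n) (fun x => x) = some 2 := by
  rw [fibo_cons n hn, PySem.List.min?_id_cons]
  have hge : ∀ x ∈ fiboLoop (n.toNat + 1) n 1 2 2 [], 2 ≤ x :=
    fiboLoop_ge_two _ n 1 2 2 (by norm_num) (by norm_num)
  have h1 := PySem.List.foldl_min_le (fiboLoop (n.toNat + 1) n 1 2 2 []) (2:Int)
  have h2 := PySem.List.foldl_min_mem (fiboLoop (n.toNat + 1) n 1 2 2 []) (2:Int)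
  have : (fiboLoop (n.toNat + 1) n 1 2 2 []).foldl min 2 = 2 := by
    rcases h2 with h | h
    · exact h
    · exact le_antisymm h1.1 (hge _ h)
  rw [this]

theorem getAux_nil (f : Nat) (n : Int) (hn : n ≤ 1) : getAux f n = [] := by
  cases f with
  | zero => rfl
  | succ f =>
    by_cases h0 : 0 ≤ n
    · have : n = 0 ∨ n = 1 := by omega
      rcases this with rfl | rfl
      · have hf : fibo 0 = [2] := by decide
        simp only [getAux, hf, PySem.List.min?_id_cons]
        norm_num
      · have hf : fibo 1 = [2] := by decide
        simp only [getAux, hf, PySem.List.min?_id_cons]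
        norm_num
    · have ht : n.toNat = 0 := by omega
      have hf : fibo n = [] := by
        show fiboLoop (n.toNat + 2) n 1 1 0 [] = []
        rw [ht]
        show fiboLoop (1+1) n 1 1 0 [] = []
        conv_lhs => rw [fiboLoop]
        rw [if_neg (by omega)]
      simp only [getAux, hf]
      rw [(PySem.List.min?_eq_none_iff _ _).mpr rfl]

theorem getAux_fuel_irrel (f : Nat) : ∀ (g : Nat) (n : Int), n.toNat ≤ f → n.toNat ≤ g →
    getAux f n = getAux g n := by
  induction f with
  | zero =>
    intro g n hf hg
    rw [getAux_nil 0 n (by omega), getAux_nil g n (by omega)]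
  | succ f ih =>
    intro g n hf hg
    by_cases hn : n ≤ 1
    · rw [getAux_nil _ _ hn, getAux_nil _ _ hn]
    · obtain ⟨g', rfl⟩ : ∃ g', g = g' + 1 := ⟨g - 1, by omega⟩
      simp only [getAux]
      have hfold : (fibo n).foldl (fun acc s =>
            if n = s then acc ++ [[s]]
            else if n > s then acc ++ ((getAux f (n - s)).map (fun c => s :: c)) else acc)
            ([] : List (List Int)) =
          (fibo n).foldl (fun acc s =>
            if n = s then acc ++ [[s]]
            else if n > s then acc ++ ((getAux g' (n - s)).map (fun c => s :: c)) else acc)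
            ([] : List (List Int)) := by
        apply PySem.List.foldl_congr_mem
        intro acc s hs
        have h2 : 2 ≤ s := fibo_ge_two n s hs
        split_ifs with h h'
        · rfl
        · rw [ih g' (n - s) (by omega) (by omega)]
        · rfl
      rw [hfold]

def gStep (m s : Int) : List (List Int) :=
  if m = s then [[s]]
  else if m > s then (getAux (m-s).toNat (m-s)).map (fun c => PySem.List.sorted (s :: c) (fun x => x) false)
  else []

theorem fiboLoop_stop (fuel : Nat) (m f1 f2 c : Int) (hc : ¬ c ≤ m) :
    fiboLoop fuel m f1 f2 c [] = [] := by
  cases fuel with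
  | zero => rfl
  | succ fuel => simp only [fiboLoop]; rw [if_neg hc]

theorem combLoop_eq (fuel : Nat) : ∀ (tbl : PySem.Dict Int (List (List Int))) (m f1 f2 c : Int)
    (acc : List (List Int)),
    (∀ k : Int, k < m → tbl.getD k [] = getAux k.toNat k) → 1 ≤ f1 → 1 ≤ f2 → c ≤ m →
    combLoop fuel tbl m f1 f2 acc = acc ++ (fiboLoop fuel m f1 f2 c []).flatMap (gStep m) := by
  induction fuel with
  | zero => intro tbl m f1 f2 c acc _ _ _ _; simp [combLoop, fiboLoop]
  | succ fuel ih =>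
    intro tbl m f1 f2 c acc ht h1 h2 hc
    have hfib : fiboLoop (fuel+1) m f1 f2 c [] = [f1+f2] ++ fiboLoop fuel m f2 (f1+f2) (f1+f2) [] := by
      conv_lhs => rw [fiboLoop]
      rw [if_pos hc, fiboLoop_acc]
      simp
    by_cases hf : f1 + f2 ≤ m
    · have hstep : (if f1 + f2 = m then acc ++ [[f1+f2]]
          else acc ++ (tbl.getD (m - (f1+f2)) []).map
            (fun c => PySem.List.sorted ((f1+f2) :: c) (fun x => x) false)) =
          acc ++ gStep m (f1+f2) := by
        unfold gStep
        by_cases he : f1 + f2 = m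
        · rw [if_pos he, if_pos he.symm]
        · rw [if_neg he, if_neg (fun h => he h.symm), if_pos (by omega),
              ht (m - (f1+f2)) (by omega)]
      calc combLoop (fuel+1) tbl m f1 f2 acc
          = combLoop fuel tbl m f2 (f1+f2) (acc ++ gStep m (f1+f2)) := by
            conv_lhs => rw [combLoop]
            rw [if_pos hf]
            simp only []
            rw [hstep]
        _ = (acc ++ gStep m (f1+f2)) ++ (fiboLoop fuel m f2 (f1+f2) (f1+f2) []).flatMap (gStep m) :=
            ih tbl m f2 (f1+f2) (f1+f2) _ ht h2 (by omega) hf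
        _ = acc ++ (fiboLoop (fuel+1) m f1 f2 c []).flatMap (gStep m) := by
            rw [hfib]; simp [List.flatMap_cons]
    · have hg : gStep m (f1+f2) = [] := by
        unfold gStep
        rw [if_neg (by omega), if_neg (by omega)]
      conv_lhs => rw [combLoop]
      rw [if_neg hf]
      rw [hfib, fiboLoop_stop fuel m f2 (f1+f2) (f1+f2) hf]
      simp [List.flatMap_cons, hg]

theorem getAux_eq_flatMap (m : Int) (hm : 2 ≤ m) :
    getAux m.toNat m = PySem.Set.ofList ((fibo m).flatMap (gStep m)) := by
  obtain ⟨t, ht⟩ : ∃ t, m.toNat = t + 1 := ⟨m.toNat - 1, by omega⟩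
  rw [ht]
  simp only [getAux]
  rw [min?_fibo m (by omega)]
  simp only []
  rw [if_neg (by omega)]
  congr 1
  have hc := PySem.List.foldl_congr_mem (l := fibo m) (init := ([] : List (List Int)))
      (f := fun acc s =>
        if m = s then acc ++ [[s]]
        else if m > s then acc ++ (getAux t (m - s)).map (fun c => s :: c)
        else acc)
      (g := fun acc s => acc ++
        (if m = s then [[s]]
         else if m > s then (getAux t (m - s)).map (fun c => s :: c)
         else []))
      (by intro acc s _; simp only []; split_ifs <;> simp)
  rw [hc, PySem.List.foldl_append_eq_flatMap, List.nil_append, List.map_flatMap]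
  apply List.flatMap_congr
  intro s hs
  have h2 : 2 ≤ s := fibo_ge_two m s hs
  unfold gStep
  split_ifs with h h'
  · rfl
  · rw [List.map_map]
    rw [getAux_fuel_irrel t ((m-s).toNat) (m - s) (by omega) (le_refl _)]
    rfl
  · rfl

theorem main_level (m : Int) (tbl : PySem.Dict Int (List (List Int))) (hm : 2 ≤ m)
    (ht : ∀ k : Int, k < m → tbl.getD k [] = getAux k.toNat k) :
    PySem.List.dedup (combLoop (m.toNat + 2) tbl m 1 1 []) = getAux m.toNat m := by
  rw [combLoop_eq (m.toNat + 2) tbl m 1 1 0 [] ht (by norm_num) (by norm_num) (by omega),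
      List.nil_append, getAux_eq_flatMap m hm, PySem.List.dedup_eq_ofList]
  rfl

theorem dp_invariant : ∀ (b : Int), 2 ≤ b → ∀ k : Int, k < b →
    (((PySem.List.pyRange 2 b 1).foldl
      (fun tbl m => tbl.insert m (PySem.List.dedup (combLoop (m.toNat + 2) tbl m 1 1 [])))
      PySem.Dict.empty).getD k []) = getAux k.toNat k := by
  intro b hb
  induction b, hb using Int.le_induction with
  | base =>
    intro k hk
    rw [PySem.List.pyRange_one_eq_nil (by norm_num), List.foldl_nil,
        PySem.Dict.getD_empty, getAux_nil _ _ (by omega)]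
  | succ b hb ih =>
    intro k hk
    rw [PySem.List.pyRange_one_succ_right (by omega), List.foldl_append,
        List.foldl_cons, List.foldl_nil, PySem.Dict.getD_insert]
    split_ifs with he
    · subst he
      exact main_level k _ hb ih
    · exact ih k (by omega)

theorem final_eq (n : Int) (hp : 0 ≤ n) : get n = get_alt n := by
  by_cases h2 : 2 ≤ n
  · show getAux n.toNat n = _
    unfold get_alt
    exact (dp_invariant (n+1) (by omega) n (by omega)).symm
  · show getAux n.toNat n = _
    unfold get_alt
    rw [getAux_nil _ _ (by omega), PySem.List.pyRange_one_eq_nil (by omega), List.foldl_nil,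
        PySem.Dict.getD_empty]

-- ===== VERDICT (by name: the statement is the Claim_ definition above) =====
theorem get_spec : Claim_equal_get := by
  intro n _ hp
  unfold Spec_get
  exact final_eq n hp
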